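-- pv_equiv track=rewrite | github.com/Leibniz-IWT/ddgclib | ddgclib/geometry/curved_volume/_1_coeffs_computing.py | _ring1_ring2_topo
-- ===== SOURCE A (Python) =====
-- from typing import List, Dict, Set, Tuple, Optional
--
-- def _ring1_ring2_topo(a: int, b: int, c: int, G: List[Set[int]]):
--     seeds = {a, b, c}
--     ring1 = (G[a] | G[b] | G[c]) - seeds
--     ring2 = set()
--     for u in ring1:
--         ring2 |= G[u]
--     ring2 -= (ring1 | seeds)
--     return sorted(ring1), sorted(ring2)
-- ===== SOURCE B (Python) =====
-- def _ring1_ring2_topo(a, b, c, G):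
--     # Sort-merge formulation: build sorted candidate pools and compute each ring
--     # as a recursive merge-difference (dedup) of sorted lists; no hash sets.
--
--     def diff(pool, excl):
--         # sorted pool minus sorted excl, deduplicated; both inputs sorted.
--         if not pool:
--             return []
--         v, rest = pool[0], pool[1:]
--         if excl:
--             e = excl[0]
--             if e < v:
--                 return diff(pool, excl[1:])
--             if e == v:
--                 return diff(rest, excl)
--         r = diff(rest, excl)
--         if r and r[0] == v:
--             return r
--         return [v] + r
--
--     def merge(xs, ys):
--         # merge two sorted lists
--         if not xs:
--             return ys
--         if not ys:
--             return xs
--         if xs[0] <= ys[0]: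
--             return [xs[0]] + merge(xs[1:], ys)
--         return [ys[0]] + merge(xs, ys[1:])
--
--     seeds = sorted([a, b, c])
--     pool1 = sorted([*G[a], *G[b], *G[c]])
--     ring1 = diff(pool1, seeds)
--     pool2 = sorted([x for u in ring1 for x in G[u]])
--     ring2 = diff(pool2, merge(seeds, ring1))
--     return ring1, ring2
-- ===== Notes on version B (the rewrite author's own statement) =====
-- stated objective: alternative
-- what changed: Replaces hash-set unions and subtractions by a sort-merge algorithm: builds sorted candidate pools and computes each ring via recursive two-pointer merge-difference (with dedup) of sorted lists, using no sets at all.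
import Mathlib
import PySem

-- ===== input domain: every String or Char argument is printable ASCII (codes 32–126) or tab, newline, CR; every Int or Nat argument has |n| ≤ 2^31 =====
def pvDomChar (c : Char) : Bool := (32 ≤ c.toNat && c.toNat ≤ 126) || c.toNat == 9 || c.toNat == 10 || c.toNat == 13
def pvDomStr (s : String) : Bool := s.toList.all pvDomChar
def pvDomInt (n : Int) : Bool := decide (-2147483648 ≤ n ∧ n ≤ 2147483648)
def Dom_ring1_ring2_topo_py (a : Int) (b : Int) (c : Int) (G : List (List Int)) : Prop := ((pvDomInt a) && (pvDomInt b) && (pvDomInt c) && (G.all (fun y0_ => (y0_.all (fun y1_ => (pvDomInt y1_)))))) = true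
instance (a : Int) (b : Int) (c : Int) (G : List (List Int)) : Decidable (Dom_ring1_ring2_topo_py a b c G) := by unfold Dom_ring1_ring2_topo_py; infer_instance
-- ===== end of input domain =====

-- ===== PORT A =====
-- B replaces the hash-set unions/differences by a sort-merge algorithm (sorted pools,
-- recursive merge-difference with dedup); same asymptotic cost.
-- Python's inner values are sets: an inner list stands for the set of its elements (Set.ofList dedups).
def ring1_ring2_topo_py (a : Int) (b : Int) (c : Int) (G : List (List Int)) : List Int × List Int :=
  let seeds : PySem.Set Int := PySem.Set.ofList [a, b, c]
  let ring1 : PySem.Set Int :=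
    PySem.Set.diff
      (PySem.Set.union
        (PySem.Set.union (PySem.Set.ofList (PySem.List.pyGetD G a [])) (PySem.List.pyGetD G b []))
        (PySem.List.pyGetD G c []))
      seeds
  let ring2 : PySem.Set Int :=
    ring1.foldl (fun acc u => PySem.Set.union acc (PySem.List.pyGetD G u [])) PySem.Set.empty
  let ring2 : PySem.Set Int := PySem.Set.diff ring2 (PySem.Set.union ring1 seeds)
  (PySem.List.sorted ring1 (fun x => x) false, PySem.List.sorted ring2 (fun x => x) false)

-- ===== PORT B =====
-- diff(pool, excl): sorted pool minus sorted excl, deduplicated (recursive merge-difference)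
def pvDiffSorted : List Int → List Int → List Int
  | [], _ => []
  | v :: rest, e :: et =>
      if e < v then pvDiffSorted (v :: rest) et
      else if e = v then pvDiffSorted rest (e :: et)
      else
        let r := pvDiffSorted rest (e :: et)
        if r.head? = some v then r else v :: r
  | v :: rest, [] =>
      let r := pvDiffSorted rest []
      if r.head? = some v then r else v :: r
termination_by pool excl => pool.length + excl.length

-- merge(xs, ys): merge two sorted lists
def pvMergeSorted : List Int → List Int → List Int
  | [], ys => ys
  | x :: xt, [] => x :: xt
  | x :: xt, y :: yt =>
      if x ≤ y then x :: pvMergeSorted xt (y :: yt) else y :: pvMergeSorted (x :: xt) yt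
termination_by xs ys => xs.length + ys.length

def ring1_ring2_topo_py_alt (a : Int) (b : Int) (c : Int) (G : List (List Int)) : List Int × List Int :=
  let seeds := PySem.List.sorted [a, b, c] (fun x => x) false
  let pool1 := PySem.List.sorted
    (PySem.List.pyGetD G a [] ++ PySem.List.pyGetD G b [] ++ PySem.List.pyGetD G c [])
    (fun x => x) false
  let ring1 := pvDiffSorted pool1 seeds
  let pool2 := PySem.List.sorted (ring1.flatMap (fun u => PySem.List.pyGetD G u []))
    (fun x => x) false
  let ring2 := pvDiffSorted pool2 (pvMergeSorted seeds ring1)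
  (ring1, ring2)

-- ===== PRECONDITION & SPEC =====
-- Pre_ excludes exactly the inputs where Python A raises IndexError: an out-of-range seed index,
-- or a non-seed neighbour of a seed (a 1-ring vertex) that is out of range when used as an index.
def Pre_ring1_ring2_topo_py (a : Int) (b : Int) (c : Int) (G : List (List Int)) : Prop :=
  PySem.Raise.InRange G.length a ∧ PySem.Raise.InRange G.length b ∧ PySem.Raise.InRange G.length c ∧
  ∀ u ∈ (PySem.List.pyGetD G a [] ++ PySem.List.pyGetD G b [] ++ PySem.List.pyGetD G c []),
    (u ≠ a ∧ u ≠ b ∧ u ≠ c) → PySem.Raise.InRange G.length u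
instance (a : Int) (b : Int) (c : Int) (G : List (List Int)) : Decidable (Pre_ring1_ring2_topo_py a b c G) := by unfold Pre_ring1_ring2_topo_py; infer_instance
def pvWitness_ring1_ring2_topo_py : Int × Int × Int × List (List Int) := (0, 1, 2, [[1, 3], [2], [0], [1]])
def Spec_ring1_ring2_topo_py (a : Int) (b : Int) (c : Int) (G : List (List Int)) (out : List Int × List Int) : Prop := out = ring1_ring2_topo_py_alt a b c G
instance (a : Int) (b : Int) (c : Int) (G : List (List Int)) (out : List Int × List Int) : Decidable (Spec_ring1_ring2_topo_py a b c G out) := by unfold Spec_ring1_ring2_topo_py; infer_instance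

-- ===== CLAIM (what is proved, stated in full; the proofs are below) =====
def Claim_equal_ring1_ring2_topo_py : Prop := ∀ (a : Int) (b : Int) (c : Int) (G : List (List Int)), Dom_ring1_ring2_topo_py a b c G → Pre_ring1_ring2_topo_py a b c G → Spec_ring1_ring2_topo_py a b c G (ring1_ring2_topo_py a b c G)

-- ===== LEMMAS AND PROOFS =====
theorem pv_mem_foldl_union (y : Int) (l : List Int) (s : PySem.Set Int) (f : Int → List Int) :
    y ∈ l.foldl (fun acc u => PySem.Set.union acc (f u)) s ↔ y ∈ s ∨ ∃ u ∈ l, y ∈ f u := by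
  induction l generalizing s with
  | nil => simp
  | cons x t ih =>
    simp only [List.foldl_cons, ih, PySem.Set.mem_union, List.mem_cons]
    constructor
    · rintro (⟨h | h⟩ | ⟨u, hu, hy⟩)
      · exact Or.inl h
      · exact Or.inr ⟨x, Or.inl rfl, h⟩
      · exact Or.inr ⟨u, Or.inr hu, hy⟩
    · rintro (h | ⟨u, (rfl | hu), hy⟩)
      · exact Or.inl (Or.inl h)
      · exact Or.inl (Or.inr hy)
      · exact Or.inr ⟨u, hu, hy⟩

theorem pv_nodup_foldl_union (l : List Int) (s : PySem.Set Int) (hs : s.Nodup) (f : Int → List Int) :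
    (l.foldl (fun acc u => PySem.Set.union acc (f u)) s).Nodup := by
  induction l generalizing s with
  | nil => exact hs
  | cons x t ih =>
    simp only [List.foldl_cons]
    exact ih _ (PySem.Set.nodup_union _ _ hs)

theorem pv_mem_merge (y : Int) (xs ys : List Int) :
    y ∈ pvMergeSorted xs ys ↔ y ∈ xs ∨ y ∈ ys := by
  induction xs, ys using pvMergeSorted.induct with
  | case1 ys => simp [pvMergeSorted]
  | case2 x xt => simp [pvMergeSorted]
  | case3 x xt y' yt h ih => simp only [pvMergeSorted, if_pos h, List.mem_cons, ih]; tauto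
  | case4 x xt y' yt h ih => simp only [pvMergeSorted, if_neg h, List.mem_cons, ih]; tauto

theorem pv_merge_pairwise (xs ys : List Int)
    (hx : xs.Pairwise (· ≤ ·)) (hy : ys.Pairwise (· ≤ ·)) :
    (pvMergeSorted xs ys).Pairwise (· ≤ ·) := by
  induction xs, ys using pvMergeSorted.induct with
  | case1 ys => simpa [pvMergeSorted] using hy
  | case2 x xt => simpa [pvMergeSorted] using hx
  | case3 x xt y' yt h ih =>
    rw [List.pairwise_cons] at hx
    simp only [pvMergeSorted, if_pos h]
    refine List.pairwise_cons.mpr ⟨?_, ih hx.2 hy⟩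
    intro z hz
    rcases (pv_mem_merge z xt (y' :: yt)).mp hz with hz | hz
    · exact hx.1 z hz
    · rcases List.mem_cons.mp hz with rfl | hz
      · exact h
      · rw [List.pairwise_cons] at hy
        exact le_trans h (hy.1 z hz)
  | case4 x xt y' yt h ih =>
    rw [List.pairwise_cons] at hy
    simp only [pvMergeSorted, if_neg h]
    refine List.pairwise_cons.mpr ⟨?_, ih hx hy.2⟩
    intro z hz
    rcases (pv_mem_merge z (x :: xt) yt).mp hz with hz | hz
    · rcases List.mem_cons.mp hz with rfl | hz
      · omega
      · rw [List.pairwise_cons] at hx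
        exact le_trans (by omega) (hx.1 z hz)
    · exact hy.1 z hz

theorem pv_head_step (v : Int) (rest excl : List Int)
    (ihp : (pvDiffSorted rest excl).Pairwise (· < ·))
    (ihm : ∀ y, y ∈ pvDiffSorted rest excl ↔ y ∈ rest ∧ y ∉ excl)
    (hvle : ∀ z ∈ rest, v ≤ z)
    (hve : v ∉ excl) :
    (if (pvDiffSorted rest excl).head? = some v then pvDiffSorted rest excl
      else v :: pvDiffSorted rest excl).Pairwise (· < ·) ∧
    ∀ y, (y ∈ if (pvDiffSorted rest excl).head? = some v then pvDiffSorted rest excl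
      else v :: pvDiffSorted rest excl) ↔ y ∈ v :: rest ∧ y ∉ excl := by
  split_ifs with hh
  · refine ⟨ihp, fun y => ?_⟩
    rw [ihm y]
    constructor
    · rintro ⟨hy, hn⟩
      exact ⟨List.mem_cons_of_mem _ hy, hn⟩
    · rintro ⟨hy, hn⟩
      rcases List.mem_cons.mp hy with rfl | hy
      · cases hr : pvDiffSorted rest excl with
        | nil => simp [hr] at hh
        | cons h t =>
          have hhy : h = y := by simpa [hr] using hh
          exact hhy ▸ ((ihm h).mp (hr ▸ List.mem_cons_self))
      · exact ⟨hy, hn⟩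
  · have hvr : v ∉ pvDiffSorted rest excl := by
      intro hc
      cases hr : pvDiffSorted rest excl with
      | nil => rw [hr] at hc; exact List.not_mem_nil hc
      | cons h t =>
        have hhv : h ≠ v := by
          intro h'
          exact hh (by simp [hr, h'])
        rw [hr] at hc
        rcases List.mem_cons.mp hc with rfl | hc
        · exact hhv rfl
        · have hhr : h ∈ rest := ((ihm h).mp (hr ▸ List.mem_cons_self)).1
          have h1 : v ≤ h := hvle h hhr
          have h2 : h < v := (List.pairwise_cons.mp (hr ▸ ihp)).1 v hc
          omega
    constructor
    · refine List.pairwise_cons.mpr ⟨?_, ihp⟩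
      intro z hz
      have hz' := (ihm z).mp hz
      rcases lt_or_eq_of_le (hvle z hz'.1) with h | h
      · exact h
      · exact absurd (h ▸ hz) hvr
    · intro y
      simp only [List.mem_cons, ihm y]
      constructor
      · rintro (rfl | ⟨hy, hn⟩)
        · exact ⟨Or.inl rfl, hve⟩
        · exact ⟨Or.inr hy, hn⟩
      · rintro ⟨(rfl | hy), hn⟩
        · exact Or.inl rfl
        · exact Or.inr ⟨hy, hn⟩

theorem pv_diff_spec (pool excl : List Int)
    (hp : pool.Pairwise (· ≤ ·)) (he : excl.Pairwise (· ≤ ·)) :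
    (pvDiffSorted pool excl).Pairwise (· < ·) ∧
    ∀ y, y ∈ pvDiffSorted pool excl ↔ y ∈ pool ∧ y ∉ excl := by
  induction pool, excl using pvDiffSorted.induct with
  | case1 excl => simp [pvDiffSorted]
  | case2 v rest e et hlt ih =>
    rw [List.pairwise_cons] at he
    obtain ⟨ihp, ihm⟩ := ih hp he.2
    simp only [pvDiffSorted]
    rw [if_pos hlt]
    refine ⟨ihp, fun y => ?_⟩
    rw [ihm y]
    constructor
    · rintro ⟨hy, hn⟩
      refine ⟨hy, fun hc => ?_⟩
      rcases List.mem_cons.mp hc with rfl | hc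
      · rw [List.pairwise_cons] at hp
        rcases List.mem_cons.mp hy with rfl | hy
        · omega
        · have := hp.1 y hy; omega
      · exact hn hc
    · rintro ⟨hy, hn⟩
      exact ⟨hy, fun hc => hn (List.mem_cons_of_mem _ hc)⟩
  | case3 rest e et hlt ih =>
    rw [List.pairwise_cons] at hp
    obtain ⟨ihp, ihm⟩ := ih hp.2 he
    simp only [pvDiffSorted]
    rw [if_neg hlt]
    simp only [if_true]
    refine ⟨ihp, fun y => ?_⟩
    rw [ihm y]
    constructor
    · rintro ⟨hy, hn⟩
      exact ⟨List.mem_cons_of_mem _ hy, hn⟩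
    · rintro ⟨hy, hn⟩
      rcases List.mem_cons.mp hy with rfl | hy
      · exact absurd List.mem_cons_self hn
      · exact ⟨hy, hn⟩
  | case4 v rest e et hlt hne r hh ih =>
    rw [List.pairwise_cons] at hp
    obtain ⟨ihp, ihm⟩ := ih hp.2 he
    rw [List.pairwise_cons] at he
    have hve : v ∉ (e :: et) := by
      intro hc
      rcases List.mem_cons.mp hc with rfl | hc
      · exact hne rfl
      · have := he.1 v hc; omega
    simp only [pvDiffSorted]
    rw [if_neg hlt, if_neg hne]
    exact pv_head_step v rest (e :: et) ihp ihm hp.1 hve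
  | case5 v rest e et hlt hne r hh ih =>
    rw [List.pairwise_cons] at hp
    obtain ⟨ihp, ihm⟩ := ih hp.2 he
    rw [List.pairwise_cons] at he
    have hve : v ∉ (e :: et) := by
      intro hc
      rcases List.mem_cons.mp hc with rfl | hc
      · exact hne rfl
      · have := he.1 v hc; omega
    simp only [pvDiffSorted]
    rw [if_neg hlt, if_neg hne]
    exact pv_head_step v rest (e :: et) ihp ihm hp.1 hve
  | case6 v rest r hh ih =>
    rw [List.pairwise_cons] at hp
    obtain ⟨ihp, ihm⟩ := ih hp.2 he
    simp only [pvDiffSorted]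
    exact pv_head_step v rest [] ihp ihm hp.1 (List.not_mem_nil)
  | case7 v rest r hh ih =>
    rw [List.pairwise_cons] at hp
    obtain ⟨ihp, ihm⟩ := ih hp.2 he
    simp only [pvDiffSorted]
    exact pv_head_step v rest [] ihp ihm hp.1 (List.not_mem_nil)

theorem ring1_ring2_topo_py_spec : Claim_equal_ring1_ring2_topo_py := by
  intro a b c G _ _
  unfold Spec_ring1_ring2_topo_py
  simp only [ring1_ring2_topo_py, ring1_ring2_topo_py_alt]
  set s1 : PySem.Set Int :=
    PySem.Set.diff
      (PySem.Set.union
        (PySem.Set.union (PySem.Set.ofList (PySem.List.pyGetD G a [])) (PySem.List.pyGetD G b []))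
        (PySem.List.pyGetD G c []))
      (PySem.Set.ofList [a, b, c]) with hs1
  set seedsL := PySem.List.sorted [a, b, c] (fun x : Int => x) false with hseedsL
  set pool1 := PySem.List.sorted
    (PySem.List.pyGetD G a [] ++ PySem.List.pyGetD G b [] ++ PySem.List.pyGetD G c [])
    (fun x : Int => x) false with hpool1
  have hseedsP : seedsL.Pairwise (· ≤ ·) := PySem.List.sorted_pairwise _ _
  have hpool1P : pool1.Pairwise (· ≤ ·) := PySem.List.sorted_pairwise _ _
  obtain ⟨hr1lt, hr1mem⟩ := pv_diff_spec pool1 seedsL hpool1P hseedsP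
  have hmem1 : ∀ y, y ∈ pvDiffSorted pool1 seedsL ↔ y ∈ s1 := by
    intro y
    rw [hr1mem y]
    simp only [hs1, PySem.Set.mem_diff, PySem.Set.mem_union, PySem.Set.mem_ofList,
      hpool1, hseedsL, PySem.List.mem_sorted, List.mem_append]
  have hnod1 : (pvDiffSorted pool1 seedsL).Nodup := hr1lt.imp (fun h => ne_of_lt h)
  have hs1nod : s1.Nodup :=
    PySem.Set.nodup_diff _ _ (PySem.Set.nodup_union _ _ (PySem.Set.nodup_union _ _ (PySem.Set.nodup_ofList _)))
  have hperm1 : (pvDiffSorted pool1 seedsL).Perm s1 :=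
    (List.perm_ext_iff_of_nodup hnod1 hs1nod).mpr hmem1
  have hring1 : PySem.List.sorted s1 (fun x => x) false = pvDiffSorted pool1 seedsL :=
    PySem.List.sorted_eq_of_perm_of_pairwise_lt _ _ _ hperm1 hr1lt
  set ring1 := pvDiffSorted pool1 seedsL with hring1def
  set pool2 := PySem.List.sorted (ring1.flatMap (fun u => PySem.List.pyGetD G u []))
    (fun x : Int => x) false with hpool2
  set excl2 := pvMergeSorted seedsL ring1 with hexcl2
  have hexcl2P : excl2.Pairwise (· ≤ ·) :=
    pv_merge_pairwise _ _ hseedsP (hr1lt.imp le_of_lt)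
  have hpool2P : pool2.Pairwise (· ≤ ·) := PySem.List.sorted_pairwise _ _
  obtain ⟨hr2lt, hr2mem⟩ := pv_diff_spec pool2 excl2 hpool2P hexcl2P
  set s2 : PySem.Set Int :=
    PySem.Set.diff
      (s1.foldl (fun acc u => PySem.Set.union acc (PySem.List.pyGetD G u [])) PySem.Set.empty)
      (PySem.Set.union s1 (PySem.Set.ofList [a, b, c])) with hs2
  have hmem2 : ∀ y, y ∈ pvDiffSorted pool2 excl2 ↔ y ∈ s2 := by
    intro y
    rw [hr2mem y]
    have hmr1 : ∀ u : Int, u ∈ ring1 ↔ u ∈ s1 := hmem1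
    simp only [hs2, PySem.Set.mem_diff, PySem.Set.mem_union, pv_mem_foldl_union,
      hpool2, PySem.List.mem_sorted, List.mem_flatMap, hexcl2, pv_mem_merge,
      hseedsL, PySem.Set.mem_ofList]
    constructor
    · rintro ⟨⟨u, hu, hy⟩, hn⟩
      refine ⟨Or.inr ⟨u, (hmr1 u).mp hu, hy⟩, fun hc => ?_⟩
      rcases hc with hc | hc
      · exact hn (Or.inr ((hmr1 y).mpr hc))
      · exact hn (Or.inl hc)
    · rintro ⟨h, hn⟩
      rcases h with h | ⟨u, hu, hy⟩
      · simp [PySem.Set.empty] at h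
      · refine ⟨⟨u, (hmr1 u).mpr hu, hy⟩, fun hc => ?_⟩
        rcases hc with hc | hc
        · exact hn (Or.inr hc)
        · exact hn (Or.inl ((hmr1 y).mp hc))
  have hnod2 : (pvDiffSorted pool2 excl2).Nodup := hr2lt.imp (fun h => ne_of_lt h)
  have hs2nod : s2.Nodup :=
    PySem.Set.nodup_diff _ _ (pv_nodup_foldl_union _ _ List.nodup_nil _)
  have hperm2 : (pvDiffSorted pool2 excl2).Perm s2 :=
    (List.perm_ext_iff_of_nodup hnod2 hs2nod).mpr hmem2
  have hring2 : PySem.List.sorted s2 (fun x => x) false = pvDiffSorted pool2 excl2 :=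
    PySem.List.sorted_eq_of_perm_of_pairwise_lt _ _ _ hperm2 hr2lt
  simp only [Prod.mk.injEq]
  exact ⟨hring1, hring2⟩
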